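-- pv_equiv track=rewrite | github.com/AbhinavSanjay24/AI-LAB | LAB 4/Lab 4 - Hill Climbing N Queens.py | best_neighbor
-- ===== SOURCE A (Python) =====
-- def heuristic(board):
--     h = 0
--     n = len(board)
--     for i in range(n):
--         for j in range(i+1, n):
--             if board[i] == board[j] or abs(board[i]-board[j]) == abs(i-j):
--                 h += 1
--     return h
--
-- def best_neighbor(board):
--     n = len(board)
--     best = board[:]
--     best_h = heuristic(board)
--
--     for row in range(n):
--         for col in range(n):
--             if board[row] != col:
--                 new_board = board[:]
--                 new_board[row] = col
--                 h = heuristic(new_board)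
--                 if h < best_h:
--                     best = new_board
--                     best_h = h
--     return best, best_h
-- ===== SOURCE B (Python) =====
-- def heuristic(board):
--     h = 0
--     n = len(board)
--     for i in range(n):
--         for j in range(i+1, n):
--             if board[i] == board[j] or abs(board[i]-board[j]) == abs(i-j):
--                 h += 1
--     return h
--
-- def _tally(keys):
--     t = {}
--     for k in keys:
--         t[k] = t.get(k, 0) + 1
--     return t
--
-- def best_neighbor(board):
--     n = len(board)
--     col_cnt = _tally(board)
--     d1_cnt = _tally([board[r] - r for r in range(n)])
--     d2_cnt = _tally([board[r] + r for r in range(n)])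
--
--     def raw(r, c):
--         return (col_cnt.get(c, 0)
--                 + d1_cnt.get(c - r, 0)
--                 + d2_cnt.get(c + r, 0))
--
--     base = heuristic(board)
--     best_h = base
--     best_move = None
--     for row in range(n):
--         old = raw(row, board[row]) - 3   # the queen itself is counted once in each tally
--         for col in range(n):
--             if board[row] != col:
--                 h = base - old + raw(row, col)
--                 if h < best_h:
--                     best_h = h
--                     best_move = (row, col)
--     if best_move is None:
--         return board[:], best_h
--     res = board[:]
--     res[best_move[0]] = best_move[1]
--     return res, best_h
-- ===== Notes on version B (the rewrite author's own statement) =====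
-- stated objective: faster
-- what changed: B builds column/diagonal/anti-diagonal tallies once and scores every neighbor in O(1) as base - old_conflicts + new_conflicts, tracking only the best (row,col) move instead of re-running the O(n^2) pairwise heuristic on a copied board for each of the n^2 neighbors.
import Mathlib
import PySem

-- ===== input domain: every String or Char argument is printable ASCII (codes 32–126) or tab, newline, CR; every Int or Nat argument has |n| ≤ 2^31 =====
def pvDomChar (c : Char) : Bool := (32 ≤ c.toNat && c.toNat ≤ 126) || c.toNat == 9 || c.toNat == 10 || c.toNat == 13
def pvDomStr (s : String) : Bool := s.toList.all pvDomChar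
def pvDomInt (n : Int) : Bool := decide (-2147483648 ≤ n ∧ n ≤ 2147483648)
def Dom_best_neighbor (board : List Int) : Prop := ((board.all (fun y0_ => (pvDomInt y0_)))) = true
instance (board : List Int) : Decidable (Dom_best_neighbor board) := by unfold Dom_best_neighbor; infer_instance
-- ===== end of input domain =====

-- B replaces the O(n^2) heuristic evaluation of each of the n^2 neighbors by an O(1) delta
-- computed from column/diagonal tallies built once, tracking the best (row,col) move instead
-- of copying boards; objective: faster (O(n^2) vs O(n^4)).

-- ===== PORT A =====
-- helper `heuristic` of the module (used by A per neighbor, by B once for the start score)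
def heuristic (board : List Int) : Int :=
  let n : Int := (board.length : Int)
  (PySem.List.pyRange 0 n).foldl (fun h i =>
    (PySem.List.pyRange (i + 1) n).foldl (fun h j =>
      if PySem.List.pyGetD board i 0 == PySem.List.pyGetD board j 0
         || (PySem.List.pyGetD board i 0 - PySem.List.pyGetD board j 0).natAbs
              == (i - j).natAbs
      then h + 1 else h) h) 0

def best_neighbor (board : List Int) : List Int × Int :=
  let n : Int := (board.length : Int)
  (PySem.List.pyRange 0 n).foldl (fun st row =>
    (PySem.List.pyRange 0 n).foldl (fun st col =>
      if PySem.List.pyGetD board row 0 ≠ col then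
        let new_board := board.set row.toNat col  -- new_board[row] = col, row in range
        let h := heuristic new_board
        if h < st.2 then (new_board, h) else st
      else st) st) (board, heuristic board)

-- ===== PORT B =====
-- B-side helper: the dict-tally loop of Source B (t[k] = t.get(k, 0) + 1)
def tally (keys : List Int) : PySem.Dict Int Int :=
  keys.foldl (fun t k => t.modify k 0 (fun v => v + 1)) PySem.Dict.empty

def best_neighbor_alt (board : List Int) : List Int × Int :=
  let n : Int := (board.length : Int)
  let col_cnt := tally board
  let d1_cnt := tally ((PySem.List.pyRange 0 n).map (fun r => PySem.List.pyGetD board r 0 - r))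
  let d2_cnt := tally ((PySem.List.pyRange 0 n).map (fun r => PySem.List.pyGetD board r 0 + r))
  let raw : Int → Int → Int := fun r c =>
    col_cnt.getD c 0 + d1_cnt.getD (c - r) 0 + d2_cnt.getD (c + r) 0
  let base := heuristic board
  let st := (PySem.List.pyRange 0 n).foldl (fun (st : Option (Int × Int) × Int) row =>
    let old := raw row (PySem.List.pyGetD board row 0) - 3
    (PySem.List.pyRange 0 n).foldl (fun st col =>
      if PySem.List.pyGetD board row 0 ≠ col then
        let h := base - old + raw row col
        if h < st.2 then (some (row, col), h) else st
      else st) st) (none, base)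
  match st.1 with
  | none => (board, st.2)
  | some (r, c) => (board.set r.toNat c, st.2)

-- ===== PRECONDITION & SPEC =====
def Spec_best_neighbor (board : List Int) (out : List Int × Int) : Prop := out = best_neighbor_alt board
instance (board : List Int) (out : List Int × Int) : Decidable (Spec_best_neighbor board out) := by unfold Spec_best_neighbor; infer_instance

-- ===== CLAIM (what is proved, stated in full; the proofs are below) =====
def Claim_equal_best_neighbor : Prop := ∀ (board : List Int), Dom_best_neighbor board → Spec_best_neighbor board (best_neighbor board)

-- ===== LEMMAS AND PROOFS =====

-- conflict test between a queen placed at row i column x and one at row j column y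
def cf (x : Int) (i : Nat) (y : Int) (j : Nat) : Bool :=
  x == y || (x - y).natAbs == ((i : Int) - (j : Int)).natAbs

-- mathematical form of `heuristic`
def Hspec (board : List Int) : Int :=
  ∑ i ∈ Finset.range board.length, ∑ j ∈ Finset.Ico (i + 1) board.length,
    (if cf (board.getD i 0) i (board.getD j 0) j then (1 : Int) else 0)

-- number of queens of `board` other than the one in row r that conflict with a queen at (r, c)
def Nconf (board : List Int) (r : Nat) (c : Int) : Int :=
  ∑ j ∈ (Finset.range board.length).erase r,
    (if cf c r (board.getD j 0) j then (1 : Int) else 0)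

lemma pyRange_nil {a b : Int} (h : b ≤ a) : PySem.List.pyRange a b = [] := by
  apply List.eq_nil_iff_forall_not_mem.mpr
  intro x hx
  rw [PySem.List.mem_pyRange_one] at hx
  omega

lemma pyRange_cast (a : Nat) : ∀ (b : Nat),
    PySem.List.pyRange (a : Int) (b : Int) = (List.range' a (b - a)).map (Nat.cast) := by
  intro b
  induction b with
  | zero => rw [pyRange_nil (by exact_mod_cast (Nat.zero_le a))]; simp
  | succ m ih =>
    by_cases h : m + 1 ≤ a
    · rw [pyRange_nil (by exact_mod_cast h)]
      simp [Nat.sub_eq_zero_of_le h]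
    · have ha : a ≤ m := by omega
      rw [show ((m+1 : Nat) : Int) = (m : Int) + 1 by push_cast; ring]
      rw [PySem.List.pyRange_one_succ_right (by exact_mod_cast ha), ih]
      rw [show m + 1 - a = (m - a) + 1 by omega, List.range'_concat]
      simp [show a + (m - a) = m by omega]

lemma countP_range' (q : Nat → Bool) : ∀ (l a : Nat),
    (List.range' a l).countP q = ∑ j ∈ Finset.Ico a (a + l), (if q j then 1 else 0) := by
  intro l
  induction l with
  | zero => simp
  | succ m ih =>
    intro a
    rw [List.range'_succ, List.countP_cons, ih (a+1)]
    rw [Finset.sum_eq_sum_Ico_succ_bot (by omega : a < a + (m+1))]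
    rw [show a + 1 + m = a + (m+1) by omega]
    omega

lemma heuristic_eq (board : List Int) : heuristic board = Hspec board := by
  unfold heuristic
  simp only [PySem.List.foldl_count_if, PySem.List.foldl_add, zero_add]
  rw [PySem.List.pyRange_zero_natCast, List.map_map]
  have hls : ∀ (f : Nat → Int), ((List.range board.length).map f).sum
      = ∑ i ∈ Finset.range board.length, f i := fun _ => rfl
  rw [hls]
  unfold Hspec
  apply Finset.sum_congr rfl
  intro i hi
  rw [Finset.mem_range] at hi
  simp only [Function.comp]
  rw [show ((i : Int) + 1) = ((i + 1 : Nat) : Int) by push_cast; ring]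
  rw [pyRange_cast, List.countP_map, countP_range']
  rw [show (i + 1) + (board.length - (i + 1)) = board.length by omega]
  rw [Nat.cast_sum]
  apply Finset.sum_congr rfl
  intro j hj
  simp only [Function.comp, PySem.List.pyGetD_natCast, cf]
  split_ifs <;> simp_all

lemma cf_symm (x : Int) (i : Nat) (y : Int) (j : Nat) : cf x i y j = cf y j x i := by
  unfold cf
  rw [show (x == y) = (y == x) by simp [eq_comm],
      show (x - y).natAbs = (y - x).natAbs by rw [← Int.natAbs_neg, neg_sub],
      show ((i : Int) - j).natAbs = ((j : Int) - i).natAbs by rw [← Int.natAbs_neg, neg_sub]]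

lemma getD_set (board : List Int) (r : Nat) (c : Int) (j : Nat) (hj : j < board.length) :
    (board.set r c).getD j 0 = if r = j then c else board.getD j 0 := by
  rw [List.getD_eq_getElem _ _ (by simpa using hj), List.getElem_set]
  split_ifs <;> [rfl; rw [List.getD_eq_getElem _ _ hj]]

lemma Hspec_set (board : List Int) (r : Nat) (c : Int) (hr : r < board.length) :
    Hspec (board.set r c) = Hspec board - Nconf board r (board.getD r 0) + Nconf board r c := by
  set n := board.length with hn
  set D : Nat → Int := fun k =>
    (if cf c r (board.getD k 0) k then (1 : Int) else 0)
    - (if cf (board.getD r 0) r (board.getD k 0) k then (1 : Int) else 0) with hD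
  have key : Hspec (board.set r c) - Hspec board = ∑ k ∈ (Finset.range n).erase r, D k := by
    unfold Hspec
    rw [List.length_set]
    rw [← Finset.sum_sub_distrib]
    have step1 : ∀ i ∈ Finset.range n,
        ((∑ j ∈ Finset.Ico (i + 1) n,
            (if cf ((board.set r c).getD i 0) i ((board.set r c).getD j 0) j then (1:Int) else 0))
          - ∑ j ∈ Finset.Ico (i + 1) n,
            (if cf (board.getD i 0) i (board.getD j 0) j then (1:Int) else 0))
        = if i = r then (∑ j ∈ Finset.Ico (r + 1) n, D j) else (if i < r then D i else 0) := by
      intro i hi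
      rw [Finset.mem_range] at hi
      rw [← Finset.sum_sub_distrib]
      by_cases hir : i = r
      · rw [if_pos hir, hir]
        apply Finset.sum_congr rfl
        intro j hj
        rw [Finset.mem_Ico] at hj
        rw [getD_set board r c j (by omega), getD_set board r c r (by omega)]
        rw [if_pos rfl, if_neg (show ¬ r = j by omega), hD]
      · rw [if_neg hir]
        have : ∀ j ∈ Finset.Ico (i + 1) n,
            ((if cf ((board.set r c).getD i 0) i ((board.set r c).getD j 0) j then (1:Int) else 0)
              - (if cf (board.getD i 0) i (board.getD j 0) j then (1:Int) else 0))
            = if j = r then D i else 0 := by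
          intro j hj
          rw [Finset.mem_Ico] at hj
          rw [getD_set board r c j (by omega), getD_set board r c i (by omega),
              if_neg (show ¬ r = i from fun h => hir h.symm)]
          by_cases hjr : j = r
          · rw [if_pos hjr.symm, if_pos hjr, hD, hjr]
            simp only [cf_symm c r (board.getD i 0) i,
              cf_symm (board.getD r 0) r (board.getD i 0) i]
          · rw [if_neg (show ¬ r = j from fun h => hjr h.symm), if_neg hjr, sub_self]
        rw [Finset.sum_congr rfl this, Finset.sum_ite_eq']
        by_cases hlt : i < r
        · rw [if_pos (Finset.mem_Ico.mpr ⟨by omega, by omega⟩), if_pos hlt]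
        · rw [if_neg (fun hm => by rcases Finset.mem_Ico.mp hm with ⟨h1, h2⟩; omega), if_neg hlt]
    rw [Finset.sum_congr rfl step1]
    rw [← Finset.add_sum_erase _ _ (Finset.mem_range.mpr hr), if_pos rfl]
    have : ∀ i ∈ (Finset.range n).erase r,
        (if i = r then (∑ j ∈ Finset.Ico (r + 1) n, D j) else (if i < r then D i else 0))
        = if i < r then D i else 0 := by
      intro i hi
      rw [Finset.mem_erase] at hi
      rw [if_neg hi.1]
    rw [Finset.sum_congr rfl this]
    have split : ∀ k ∈ (Finset.range n).erase r,
        D k = (if k < r then D k else 0) + (if r < k then D k else 0) := by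
      intro k hk
      rw [Finset.mem_erase] at hk
      rcases Nat.lt_or_ge k r with h | h
      · rw [if_pos h, if_neg (by omega), add_zero]
      · rw [if_neg (by omega), if_pos (by omega), zero_add]
    rw [Finset.sum_congr rfl split, Finset.sum_add_distrib]
    have hIco : ∑ j ∈ Finset.Ico (r + 1) n, D j
        = ∑ k ∈ (Finset.range n).erase r, (if r < k then D k else 0) := by
      rw [Finset.sum_ite, Finset.sum_const_zero, add_zero]
      apply Finset.sum_congr
      · apply Finset.ext
        intro k
        simp only [Finset.mem_Ico, Finset.mem_filter, Finset.mem_erase, Finset.mem_range]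
        omega
      · intro _ _; rfl
    rw [hIco]
    ring
  unfold Nconf
  rw [hD] at key
  rw [Finset.sum_sub_distrib] at key
  rw [← hn]
  omega

lemma tally_getD (keys : List Int) (k : Int) : (tally keys).getD k 0 = (keys.count k : Int) := by
  unfold tally
  rw [PySem.Dict.getD_foldl_modify_add_one]
  simp [PySem.Dict.empty, PySem.Dict.getD, PySem.Dict.get?]

lemma map_getD_range (l : List Int) : (List.range l.length).map (fun i => l.getD i 0) = l := by
  apply List.ext_getElem
  · simp
  · intro i h1 h2
    simp only [List.getElem_map, List.getElem_range]
    rw [List.getD_eq_getElem l 0 h2]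

lemma count_eq_sum (l : List Int) (q : Int → Bool) :
    (l.countP q : Int) = ∑ j ∈ Finset.range l.length, (if q (l.getD j 0) then (1 : Int) else 0) := by
  conv_lhs => rw [← map_getD_range l]
  rw [List.countP_map, List.range_eq_range', countP_range']
  rw [Nat.cast_sum]
  simp [Function.comp]

lemma pt_ne (bj c r j : Int) (hne : r ≠ j) :
    ((if bj == c then (1:Int) else 0) + (if bj - j == c - r then 1 else 0)
      + (if bj + j == c + r then 1 else 0))
    = if (c == bj || (c - bj).natAbs == (r - j).natAbs) then 1 else 0 := by
  simp only [beq_iff_eq, Bool.or_eq_true, Int.natAbs_eq_natAbs_iff]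
  split_ifs <;> omega

lemma pt_self (br c r : Int) :
    ((if br == c then (1:Int) else 0) + (if br - r == c - r then 1 else 0)
      + (if br + r == c + r then 1 else 0))
    = 3 * (if br == c then (1:Int) else 0) := by
  simp only [beq_iff_eq]
  split_ifs <;> omega

lemma raw_eq (board : List Int) (r : Nat) (c : Int) (hr : r < board.length) :
    ((tally board).getD c 0
      + (tally ((PySem.List.pyRange 0 (board.length : Int)).map
            (fun x => PySem.List.pyGetD board x 0 - x))).getD (c - (r : Int)) 0
      + (tally ((PySem.List.pyRange 0 (board.length : Int)).map
            (fun x => PySem.List.pyGetD board x 0 + x))).getD (c + (r : Int)) 0)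
    = Nconf board r c + 3 * (if board.getD r 0 == c then (1 : Int) else 0) := by
  rw [tally_getD, tally_getD, tally_getD]
  rw [List.count_eq_countP, List.count_eq_countP, List.count_eq_countP]
  rw [List.countP_map, List.countP_map]
  rw [PySem.List.pyRange_zero_natCast, List.countP_map, List.countP_map]
  simp only [Function.comp_def]
  have h1 : ((board.countP (fun x => x == c)) : Int)
      = ∑ j ∈ Finset.range board.length, (if board.getD j 0 == c then (1:Int) else 0) :=
    count_eq_sum board _
  have h2 : (((List.range board.length).countP
        (fun k : Nat => PySem.List.pyGetD board (k : Int) 0 - (k : Int) == c - (r : Int))) : Int)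
      = ∑ j ∈ Finset.range board.length,
          (if board.getD j 0 - (j : Int) == c - (r : Int) then (1:Int) else 0) := by
    rw [List.range_eq_range', countP_range', Nat.cast_sum]
    simp [PySem.List.pyGetD_natCast]
  have h3 : (((List.range board.length).countP
        (fun k : Nat => PySem.List.pyGetD board (k : Int) 0 + (k : Int) == c + (r : Int))) : Int)
      = ∑ j ∈ Finset.range board.length,
          (if board.getD j 0 + (j : Int) == c + (r : Int) then (1:Int) else 0) := by
    rw [List.range_eq_range', countP_range', Nat.cast_sum]
    simp [PySem.List.pyGetD_natCast]
  rw [h1, h2, h3, ← Finset.sum_add_distrib, ← Finset.sum_add_distrib]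
  rw [← Finset.add_sum_erase _ _ (Finset.mem_range.mpr hr)]
  rw [pt_self (board.getD r 0) c r]
  have : ∀ j ∈ (Finset.range board.length).erase r,
      ((if board.getD j 0 == c then (1:Int) else 0)
        + (if board.getD j 0 - (j : Int) == c - (r : Int) then (1:Int) else 0)
        + (if board.getD j 0 + (j : Int) == c + (r : Int) then (1:Int) else 0))
      = if cf c r (board.getD j 0) j then (1:Int) else 0 := by
    intro j hj
    rw [Finset.mem_erase] at hj
    rw [pt_ne (board.getD j 0) c r j (by
      intro h
      exact hj.1 (by exact_mod_cast h.symm))]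
    rfl
  rw [Finset.sum_congr rfl this]
  unfold Nconf
  ring

lemma fold_rel {SA SB : Type} (l : List Int) (fA : SA → Int → SA) (fB : SB → Int → SB)
    (R : SA → SB → Prop)
    (h : ∀ a b x, x ∈ l → R a b → R (fA a x) (fB b x)) :
    ∀ a b, R a b → R (l.foldl fA a) (l.foldl fB b) := by
  induction l with
  | nil => intro a b hab; exact hab
  | cons x xs ih =>
    intro a b hab
    exact ih (fun a b y hy => h a b y (List.mem_cons_of_mem _ hy))
      _ _ (h a b x (List.mem_cons_self) hab)

-- proof-local restatements of the two loop bodies (definitionally equal to the ports)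
def rawF (board : List Int) (r c : Int) : Int :=
  (tally board).getD c 0
  + (tally ((PySem.List.pyRange 0 (board.length : Int)).map
      (fun x => PySem.List.pyGetD board x 0 - x))).getD (c - r) 0
  + (tally ((PySem.List.pyRange 0 (board.length : Int)).map
      (fun x => PySem.List.pyGetD board x 0 + x))).getD (c + r) 0

def loopA (board : List Int) : List Int × Int :=
  (PySem.List.pyRange 0 (board.length : Int)).foldl (fun st row =>
    (PySem.List.pyRange 0 (board.length : Int)).foldl (fun st col =>
      if PySem.List.pyGetD board row 0 ≠ col then
        (if heuristic (board.set row.toNat col) < st.2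
         then (board.set row.toNat col, heuristic (board.set row.toNat col)) else st)
      else st) st) (board, heuristic board)

def loopB (board : List Int) : Option (Int × Int) × Int :=
  (PySem.List.pyRange 0 (board.length : Int)).foldl (fun st row =>
    (PySem.List.pyRange 0 (board.length : Int)).foldl (fun st col =>
      if PySem.List.pyGetD board row 0 ≠ col then
        (if heuristic board - (rawF board row (PySem.List.pyGetD board row 0) - 3)
              + rawF board row col < st.2
         then (some (row, col),
               heuristic board - (rawF board row (PySem.List.pyGetD board row 0) - 3)
                 + rawF board row col)
         else st)
      else st) st) (none, heuristic board)

-- the O(1) neighbor score of B equals A's full re-evaluation of the changed board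
lemma step_eq (board : List Int) (row col : Int) (h0 : 0 ≤ row) (h1 : row < (board.length : Int))
    (hg : PySem.List.pyGetD board row 0 ≠ col) :
    heuristic (board.set row.toNat col)
      = heuristic board - (rawF board row (PySem.List.pyGetD board row 0) - 3)
          + rawF board row col := by
  unfold rawF
  obtain ⟨r, rfl⟩ : ∃ r : Nat, row = (r : Int) := ⟨row.toNat, (Int.toNat_of_nonneg h0).symm⟩
  have hr : r < board.length := by exact_mod_cast h1
  simp only [Int.toNat_natCast, PySem.List.pyGetD_natCast] at hg ⊢
  rw [raw_eq board r (board.getD r 0) hr, raw_eq board r col hr]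
  rw [heuristic_eq, heuristic_eq, Hspec_set board r col hr]
  rw [if_pos (beq_self_eq_true _), if_neg (by simpa using hg)]
  ring

lemma loops_rel (board : List Int) :
    (loopA board).2 = (loopB board).2 ∧
    (loopA board).1 = (match (loopB board).1 with
      | none => board
      | some (r, c) => board.set r.toNat c) := by
  unfold loopA loopB
  refine fold_rel _ _ _
    (fun (sa : List Int × Int) (sb : Option (Int × Int) × Int) =>
      sa.2 = sb.2 ∧ sa.1 = (match sb.1 with
      | none => board
      | some (r, c) => board.set r.toNat c)) ?_ _ _ ⟨rfl, rfl⟩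
  intro a b row hrow hab
  rw [PySem.List.mem_pyRange_one] at hrow
  refine fold_rel _ _ _
    (fun (sa : List Int × Int) (sb : Option (Int × Int) × Int) =>
      sa.2 = sb.2 ∧ sa.1 = (match sb.1 with
      | none => board
      | some (r, c) => board.set r.toNat c)) ?_ a b hab
  intro a' b' col _ hab'
  obtain ⟨h2, h1⟩ := hab'
  by_cases hg : PySem.List.pyGetD board row 0 ≠ col
  · rw [if_pos hg, if_pos hg]
    rw [← step_eq board row col hrow.1 hrow.2 hg, ← h2]
    by_cases hlt : heuristic (board.set row.toNat col) < a'.2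
    · rw [if_pos hlt, if_pos hlt]
      exact ⟨rfl, rfl⟩
    · rw [if_neg hlt, if_neg hlt]
      exact ⟨h2, h1⟩
  · rw [if_neg hg, if_neg hg]
    exact ⟨h2, h1⟩

-- ===== VERDICT (by name: the statement is the Claim_ definition above) =====
theorem best_neighbor_spec : Claim_equal_best_neighbor := by
  intro board _
  show best_neighbor board = best_neighbor_alt board
  have hA : best_neighbor board = loopA board := rfl
  have hB : best_neighbor_alt board = (match (loopB board).1 with
    | none => (board, (loopB board).2)
    | some (r, c) => (board.set r.toNat c, (loopB board).2)) := by
    unfold best_neighbor_alt loopB rawF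
    rfl
  rw [hA, hB]
  obtain ⟨h2, h1⟩ := loops_rel board
  cases hopt : (loopB board).1 with
  | none =>
    rw [hopt] at h1
    simp only at h1 ⊢
    exact Prod.ext h1 h2
  | some rc =>
    obtain ⟨r, c⟩ := rc
    rw [hopt] at h1
    simp only at h1 ⊢
    exact Prod.ext h1 h2
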